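-- pv_equiv track=rewrite | github.com/boba8710/ZWHASH | sponge.py | stringAND
-- ===== SOURCE A (Python) =====
-- def stringAND(s1,s2):
-- 	ls1 = list(s1)
-- 	ls2 = list(s2)
-- 	retString = ""
-- 	if len(ls1) > len(ls2):
-- 		while(True):
-- 			if len(ls1) != len(ls2):
-- 				ls2.append('0');
-- 			else:
-- 				break
-- 	else:
-- 		while(True):
-- 			if len(ls1) != len(ls2):
-- 				ls1.append('0');
-- 			else:
-- 				break
-- 	for i in range(0,len(ls1)):
-- 		if((ls1[i] == '1' and ls2[i] == '1')):
-- 			retString = retString + '1'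
-- 		else:
-- 			retString = retString + '0'
-- 	return retString
-- ===== SOURCE B (Python) =====
-- def stringAND(s1, s2):
--     ones = {i for i, c in enumerate(s1) if c == '1'} & {i for i, c in enumerate(s2) if c == '1'}
--     return ''.join('1' if i in ones else '0' for i in range(max(len(s1), len(s2))))
-- ===== Notes on version B (the rewrite author's own statement) =====
-- stated objective: alternative
-- what changed: Instead of padding the shorter list with '0' and ANDing position by position, B builds the set of '1'-indices of each string, intersects the two sets, and renders the result string with '1' exactly at the intersected indices, so no padding and no per-position pairwise comparison occurs.
import Mathlib
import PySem

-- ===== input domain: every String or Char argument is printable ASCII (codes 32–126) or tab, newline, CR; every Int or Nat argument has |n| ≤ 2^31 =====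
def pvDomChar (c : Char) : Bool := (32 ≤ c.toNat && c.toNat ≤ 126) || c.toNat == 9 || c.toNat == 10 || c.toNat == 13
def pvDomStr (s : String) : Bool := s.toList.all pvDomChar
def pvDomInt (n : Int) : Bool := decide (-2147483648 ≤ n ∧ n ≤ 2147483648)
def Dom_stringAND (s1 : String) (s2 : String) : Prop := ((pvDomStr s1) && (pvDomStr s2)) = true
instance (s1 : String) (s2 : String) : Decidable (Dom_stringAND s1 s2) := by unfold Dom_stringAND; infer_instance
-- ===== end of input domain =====

-- B drops A's pad-then-index-loop entirely: it collects the '1'-positions of each string into a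
-- set, intersects the two sets, and emits '1' exactly at the intersected indices (alternative).

-- ===== PORT A =====
-- A's while-loop appends '0' to the shorter list until the lengths agree; it runs exactly
-- (longer - shorter) iterations, which is the recursion measure used here.
def pvPadA (l : List Char) : Nat → List Char
  | 0 => l
  | k + 1 => pvPadA (l ++ ['0']) k

def stringAND (s1 : String) (s2 : String) : String :=
  let ls1 := s1.toList
  let ls2 := s2.toList
  let p :=
    if ls1.length > ls2.length then (ls1, pvPadA ls2 (ls1.length - ls2.length))
    else (pvPadA ls1 (ls2.length - ls1.length), ls2)
  let retString := (PySem.List.pyRange 0 p.1.length 1).foldl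
    (fun r i =>
      if PySem.List.pyGet? p.1 i = some '1' ∧ PySem.List.pyGet? p.2 i = some '1'
      then r ++ ['1'] else r ++ ['0']) []
  String.ofList retString

-- ===== PORT B =====
-- {i for i, c in enumerate(s) if c == '1'} : the distinct indices, in order
def pvOnes (l : List Char) : PySem.Set Int :=
  PySem.Set.ofList ((PySem.List.enumerate l).filterMap fun p => if p.2 = '1' then some p.1 else none)

def stringAND_alt (s1 : String) (s2 : String) : String :=
  let ones := PySem.Set.inter (pvOnes s1.toList) (pvOnes s2.toList)
  String.ofList ((PySem.List.pyRange 0 (max s1.toList.length s2.toList.length) 1).map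
    fun i => if PySem.Set.contains ones i then '1' else '0')

-- ===== PRECONDITION & SPEC =====
def Spec_stringAND (s1 : String) (s2 : String) (out : String) : Prop := out = stringAND_alt s1 s2
instance (s1 : String) (s2 : String) (out : String) : Decidable (Spec_stringAND s1 s2 out) := by unfold Spec_stringAND; infer_instance

-- ===== CLAIM (what is proved, stated in full; the proofs are below) =====
def Claim_equal_stringAND : Prop := ∀ (s1 : String) (s2 : String), Dom_stringAND s1 s2 → Spec_stringAND s1 s2 (stringAND s1 s2)

-- ===== LEMMAS AND PROOFS =====

theorem pvPadA_eq (l : List Char) (n : Nat) : pvPadA l n = l ++ List.replicate n '0' := by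
  induction n generalizing l with
  | zero => simp [pvPadA]
  | succ k ih => simp [pvPadA, ih, List.append_assoc, List.replicate_succ]

-- membership in the '1'-position set of one string
theorem pvMem_ones (l : List Char) (i : Int) (h0 : 0 ≤ i) :
    (PySem.Set.contains (pvOnes l) i = true) ↔
      (i < (l.length : Int) ∧ PySem.List.pyGet? l i = some '1') := by
  rw [PySem.Set.contains_iff]
  unfold pvOnes
  rw [PySem.Set.mem_ofList, List.mem_filterMap]
  rw [PySem.List.pyGet?_of_nonneg l h0]
  constructor
  · rintro ⟨p, hp, hif⟩
    rw [PySem.List.mem_enumerate_iff] at hp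
    obtain ⟨k, hk, rfl⟩ := hp
    by_cases h1 : (l[k] : Char) = '1'
    · rw [if_pos h1] at hif
      have hik := Option.some.inj hif
      refine ⟨by omega, ?_⟩
      have hkk : i.toNat = k := by omega
      rw [hkk, List.getElem?_eq_getElem hk, h1]
    · rw [if_neg h1] at hif
      exact absurd hif (by simp)
  · rintro ⟨hlt, hget⟩
    have hk : i.toNat < l.length := by omega
    rw [List.getElem?_eq_getElem hk] at hget
    have h1 : (l[i.toNat] : Char) = '1' := Option.some.inj hget
    refine ⟨((0 : Int) + i.toNat, l[i.toNat]), ?_, ?_⟩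
    · rw [PySem.List.mem_enumerate_iff]; exact ⟨i.toNat, hk, rfl⟩
    · simp only [h1, if_pos]
      congr 1
      omega

-- pyGet? into a zero-padded list tests '1' iff the index is inside the original list and hits '1'
theorem pvGet_pad (l : List Char) (k : Nat) (i : Int) (h0 : 0 ≤ i) (h : i < ((l ++ List.replicate k '0').length : Int)) :
    (PySem.List.pyGet? (l ++ List.replicate k '0') i = some '1') ↔
      (i < (l.length : Int) ∧ PySem.List.pyGet? l i = some '1') := by
  rw [PySem.List.pyGet?_of_nonneg _ h0, PySem.List.pyGet?_of_nonneg l h0]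
  simp only [List.length_append, List.length_replicate] at h
  by_cases hm : i.toNat < l.length
  · rw [List.getElem?_append_left hm]
    constructor
    · intro hg; exact ⟨by omega, hg⟩
    · exact fun hg => hg.2
  · rw [List.getElem?_append_right (by omega)]
    have : i.toNat - l.length < k := by omega
    simp only [List.getElem?_replicate, if_pos this]
    constructor
    · intro hg; exact absurd hg (by simp)
    · intro hg; omega

-- A's padded per-index test agrees with B's intersected-set membership test
theorem pvCond_eq (l1 l2 : List Char) (k1 k2 : Nat)
    (i : Int) (h0 : 0 ≤ i) (h1 : i < ((l1 ++ List.replicate k1 '0').length : Int))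
    (h2 : i < ((l2 ++ List.replicate k2 '0').length : Int)) :
    (if PySem.List.pyGet? (l1 ++ List.replicate k1 '0') i = some '1' ∧
        PySem.List.pyGet? (l2 ++ List.replicate k2 '0') i = some '1' then ('1':Char) else '0')
    = (if PySem.Set.contains (PySem.Set.inter (pvOnes l1) (pvOnes l2)) i then '1' else '0') := by
  have e1 := pvGet_pad l1 k1 i h0 h1
  have e2 := pvGet_pad l2 k2 i h0 h2
  have hc : (PySem.Set.contains (PySem.Set.inter (pvOnes l1) (pvOnes l2)) i = true) ↔
      ((i < (l1.length : Int) ∧ PySem.List.pyGet? l1 i = some '1') ∧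
       (i < (l2.length : Int) ∧ PySem.List.pyGet? l2 i = some '1')) := by
    rw [PySem.Set.contains_iff, PySem.Set.mem_inter, ← PySem.Set.contains_iff, ← PySem.Set.contains_iff,
      pvMem_ones l1 i h0, pvMem_ones l2 i h0]
  split_ifs with hA hB hB
  · rfl
  · exact absurd (hc.mpr ⟨e1.mp hA.1, e2.mp hA.2⟩) (by simpa using hB)
  · have := hc.mp (by simpa using hB)
    exact absurd ⟨e1.mpr this.1, e2.mpr this.2⟩ hA
  · rfl

-- the foldl building retString is the map over the same range
theorem pvFoldl_eq_map (a b : List Char) (r : List Int) (acc : List Char) :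
    r.foldl (fun r i =>
      if PySem.List.pyGet? a i = some '1' ∧ PySem.List.pyGet? b i = some '1'
      then r ++ ['1'] else r ++ ['0']) acc
    = acc ++ r.map (fun i =>
        if PySem.List.pyGet? a i = some '1' ∧ PySem.List.pyGet? b i = some '1'
        then '1' else '0') := by
  induction r generalizing acc with
  | nil => simp
  | cons x xs ih =>
    simp only [List.foldl_cons, List.map_cons]
    by_cases hx : PySem.List.pyGet? a x = some '1' ∧ PySem.List.pyGet? b x = some '1' <;>
      simp [hx, ih, List.append_assoc]

theorem pv_main (l1 l2 : List Char) (k1 k2 : Nat) (hk : l1.length + k1 = l2.length + k2)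
    (hn : l1.length + k1 = max l1.length l2.length) :
    String.ofList ((PySem.List.pyRange 0 ((l1 ++ List.replicate k1 '0').length) 1).foldl
      (fun r i =>
        if PySem.List.pyGet? (l1 ++ List.replicate k1 '0') i = some '1' ∧
           PySem.List.pyGet? (l2 ++ List.replicate k2 '0') i = some '1'
        then r ++ ['1'] else r ++ ['0']) [])
    = String.ofList ((PySem.List.pyRange 0 (max l1.length l2.length) 1).map
        fun i => if PySem.Set.contains (PySem.Set.inter (pvOnes l1) (pvOnes l2)) i then '1' else '0') := by
  rw [pvFoldl_eq_map, List.nil_append]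
  have hlen : ((l1 ++ List.replicate k1 '0').length : Int) = ((max l1.length l2.length : Nat) : Int) := by
    simp only [List.length_append, List.length_replicate]; exact_mod_cast hn
  rw [hlen, Nat.cast_max]
  congr 1
  apply List.map_congr_left
  intro i hi
  rw [PySem.List.mem_pyRange_one] at hi
  have hi1 : i < ((l1 ++ List.replicate k1 '0').length : Int) := by rw [hlen, Nat.cast_max]; exact hi.2
  have hi2 : i < ((l2 ++ List.replicate k2 '0').length : Int) := by
    simp only [List.length_append, List.length_replicate] at hi1 ⊢; omega
  exact pvCond_eq l1 l2 k1 k2 i hi.1 hi1 hi2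

-- ===== VERDICT (by name: the statement is the Claim_ definition above) =====
theorem stringAND_spec : Claim_equal_stringAND := by
  intro s1 s2 _
  show stringAND s1 s2 = stringAND_alt s1 s2
  unfold stringAND stringAND_alt
  by_cases h : s1.toList.length > s2.toList.length
  · simp only [if_pos h, pvPadA_eq]
    have key := pv_main s1.toList s2.toList 0 (s1.toList.length - s2.toList.length)
      (by omega) (by omega)
    simp only [List.replicate_zero, List.append_nil] at key
    simpa using key
  · simp only [if_neg h, pvPadA_eq]
    have key := pv_main s1.toList s2.toList (s2.toList.length - s1.toList.length) 0
      (by omega) (by omega)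
    simp only [List.replicate_zero, List.append_nil] at key
    simpa using key
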